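-- pv_equiv track=rewrite | github.com/yskang/AlgorithmPractice | baekjoon/python/fibonacci_number_and_gcd_11778.py | get_gcd_of_fibonacci
-- ===== SOURCE A (Python) =====
-- def gcd(a, b):
--     while b != 0:
--         r = a % b
--         a = b
--         b = r
--     return a
--
-- def get_gcd_of_fibonacci(n, m):
--     gcd_val = gcd(n, m)
--
--     ans = [[1, 0], [1, 0]]
--     a = [[1, 1], [1, 0]]
--
--     while gcd_val > 0:
--         if gcd_val % 2 == 1:
--             ans = [[(ans[0][0]*a[0][0]+ans[0][1]*a[1][0]) % 1000000007, (ans[0][0]*a[0][1]+ans[0][1]*a[1][1]) % 1000000007],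
--             [(ans[1][0]*a[0][0]+ans[1][1]*a[1][0]) % 1000000007, (ans[1][0]*a[0][1]+ans[1][1]*a[1][1]) % 1000000007]]
--
--         a = [[(a[0][0]*a[0][0]+a[0][1]*a[1][0]) % 1000000007, (a[0][0]*a[0][1]+a[0][1]*a[1][1]) % 1000000007],
--             [(a[1][0]*a[0][0]+a[1][1]*a[1][0]) % 1000000007, (a[1][0]*a[0][1]+a[1][1]*a[1][1]) % 1000000007]]
--
--         gcd_val //= 2
--
--     return ans[0][1] % 1000000007
-- ===== SOURCE B (Python) =====
-- M = 1000000007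
--
-- def gcd(a, b):
--     while b != 0:
--         r = a % b
--         a = b
--         b = r
--     return a
--
-- def _fib_pair(k):
--     # returns (F(k) % M, F(k+1) % M) by fast doubling
--     if k == 0:
--         return (0, 1)
--     f, g = _fib_pair(k // 2)
--     c = f * (2 * g - f) % M
--     d = (f * f + g * g) % M
--     if k % 2 == 1:
--         return (d, (c + d) % M)
--     return (c, d)
--
-- def get_gcd_of_fibonacci(n, m):
--     g = gcd(n, m)
--     if g <= 0:
--         return 0
--     return _fib_pair(g)[0]
-- ===== Notes on version B (the rewrite author's own statement) =====
-- stated objective: alternative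
-- what changed: replaces the 2x2 matrix-power loop by recursive fast doubling on the pair (F(k), F(k+1)) mod 1e9+7, with an explicit early return 0 when gcd(n,m) <= 0
import Mathlib
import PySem

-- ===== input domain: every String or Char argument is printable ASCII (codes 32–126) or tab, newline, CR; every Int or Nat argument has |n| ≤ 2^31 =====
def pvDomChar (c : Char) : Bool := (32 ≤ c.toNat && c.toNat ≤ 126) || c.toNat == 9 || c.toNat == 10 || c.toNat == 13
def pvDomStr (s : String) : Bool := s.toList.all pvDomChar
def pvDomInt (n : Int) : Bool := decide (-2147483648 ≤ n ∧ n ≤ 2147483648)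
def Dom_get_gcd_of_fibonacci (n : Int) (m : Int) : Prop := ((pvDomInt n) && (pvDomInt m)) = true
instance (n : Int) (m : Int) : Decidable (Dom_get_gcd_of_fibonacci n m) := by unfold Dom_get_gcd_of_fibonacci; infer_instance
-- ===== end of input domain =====

-- B replaces A's 2x2 matrix-power loop by recursive fast doubling on the pair (F(k), F(k+1)) mod 1e9+7 (alternative algorithm, same asymptotics).

-- ===== PORT A =====
-- Python's `a % b` (sign of divisor) via PySem.Int.mod; only called with b ≠ 0.
def pvGcdA (a b : Int) : Int :=
  if h : b ≠ 0 then pvGcdA b (PySem.Int.mod a b) else a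
termination_by b.natAbs
decreasing_by
  rcases lt_trichotomy b 0 with hb | hb | hb
  · have h1 := PySem.Int.mod_neg_bounds a hb
    omega
  · exact absurd hb h
  · have h1 := PySem.Int.mod_nonneg a hb
    have h2 := PySem.Int.mod_lt a hb
    omega

def pvAmul (x y : (Int × Int) × (Int × Int)) : (Int × Int) × (Int × Int) :=
  ((PySem.Int.mod (x.1.1 * y.1.1 + x.1.2 * y.2.1) 1000000007,
    PySem.Int.mod (x.1.1 * y.1.2 + x.1.2 * y.2.2) 1000000007),
   (PySem.Int.mod (x.2.1 * y.1.1 + x.2.2 * y.2.1) 1000000007,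
    PySem.Int.mod (x.2.1 * y.1.2 + x.2.2 * y.2.2) 1000000007))

def pvAloop (ans a : (Int × Int) × (Int × Int)) (g : Int) : (Int × Int) × (Int × Int) :=
  if hg : g > 0 then
    pvAloop (if PySem.Int.mod g 2 = 1 then pvAmul ans a else ans) (pvAmul a a)
      (PySem.Int.floordiv g 2)
  else ans
termination_by g.toNat
decreasing_by
  rw [PySem.Int.floordiv_eq_ediv_of_pos (by omega)]
  omega

def get_gcd_of_fibonacci (n : Int) (m : Int) : Int :=
  PySem.Int.mod (pvAloop ((1, 0), (1, 0)) ((1, 1), (1, 0)) (pvGcdA n m)).1.2 1000000007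

-- ===== PORT B =====
def pvGcdB (a b : Int) : Int :=
  if h : b ≠ 0 then pvGcdB b (PySem.Int.mod a b) else a
termination_by b.natAbs
decreasing_by
  rcases lt_trichotomy b 0 with hb | hb | hb
  · have h1 := PySem.Int.mod_neg_bounds a hb
    omega
  · exact absurd hb h
  · have h1 := PySem.Int.mod_nonneg a hb
    have h2 := PySem.Int.mod_lt a hb
    omega

-- fast doubling: returns (F(k) % M, F(k+1) % M)
def pvFibPair (k : Nat) : Int × Int :=
  if hk : k = 0 then (0, 1)
  else
    let f := (pvFibPair (k / 2)).1
    let g := (pvFibPair (k / 2)).2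
    let c := PySem.Int.mod (f * (2 * g - f)) 1000000007
    let d := PySem.Int.mod (f * f + g * g) 1000000007
    if k % 2 = 1 then (d, PySem.Int.mod (c + d) 1000000007) else (c, d)
termination_by k
decreasing_by omega

def get_gcd_of_fibonacci_alt (n : Int) (m : Int) : Int :=
  let g := pvGcdB n m
  if g ≤ 0 then 0 else (pvFibPair g.toNat).1

-- ===== PRECONDITION & SPEC =====
def Spec_get_gcd_of_fibonacci (n : Int) (m : Int) (out : Int) : Prop := out = get_gcd_of_fibonacci_alt n m
instance (n : Int) (m : Int) (out : Int) : Decidable (Spec_get_gcd_of_fibonacci n m out) := by unfold Spec_get_gcd_of_fibonacci; infer_instance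

-- ===== CLAIM (what is proved, stated in full; the proofs are below) =====
def Claim_equal_get_gcd_of_fibonacci : Prop := ∀ (n : Int) (m : Int), Dom_get_gcd_of_fibonacci n m → Spec_get_gcd_of_fibonacci n m (get_gcd_of_fibonacci n m)

-- ===== LEMMAS AND PROOFS =====

def pvFibm (k : Nat) : Int := (Nat.fib k : Int) % 1000000007

lemma pvModP (a : Int) : PySem.Int.mod a 1000000007 = a % 1000000007 :=
  PySem.Int.mod_eq_emod_of_pos (by norm_num)

lemma pvSelf (a : Int) : a % 1000000007 ≡ a [ZMOD 1000000007] :=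
  Int.emod_emod_of_dvd a dvd_rfl

lemma pvMix (a b c d : Int) :
    (a % 1000000007 * (b % 1000000007) + c % 1000000007 * (d % 1000000007)) % 1000000007
      = (a * b + c * d) % 1000000007 :=
  ((pvSelf a).mul (pvSelf b)).add ((pvSelf c).mul (pvSelf d))

lemma pvFibEntry (a a' b b' r : Nat) (ha : a' = a + 1) (hb : b' = b + 1) (h : a + b + 1 = r) :
    (pvFibm a' * pvFibm b' + pvFibm a * pvFibm b) % 1000000007 = pvFibm r := by
  subst ha hb h
  unfold pvFibm
  rw [pvMix]
  congr 1
  have hn : Nat.fib (a + 1) * Nat.fib (b + 1) + Nat.fib a * Nat.fib b = Nat.fib (a + b + 1) := by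
    rw [Nat.fib_add]; ring
  exact_mod_cast congrArg (fun t : Nat => (t : Int)) hn

def pvAnsOf (i : Nat) : (Int × Int) × (Int × Int) :=
  ((pvFibm (i + 1), pvFibm i), (pvFibm (i + 1), pvFibm i))

def pvMatOf (j : Nat) : (Int × Int) × (Int × Int) :=
  ((pvFibm (j + 2), pvFibm (j + 1)), (pvFibm (j + 1), pvFibm j))

lemma pvAmul_ans (i j : Nat) : pvAmul (pvAnsOf i) (pvMatOf j) = pvAnsOf (i + j + 1) := by
  unfold pvAmul pvAnsOf pvMatOf
  simp only [pvModP, Prod.mk.injEq]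
  refine ⟨⟨?_, ?_⟩, ?_, ?_⟩
  · exact pvFibEntry i (i + 1) (j + 1) (j + 2) _ (by omega) (by omega) (by omega)
  · exact pvFibEntry i (i + 1) j (j + 1) _ (by omega) (by omega) (by omega)
  · exact pvFibEntry i (i + 1) (j + 1) (j + 2) _ (by omega) (by omega) (by omega)
  · exact pvFibEntry i (i + 1) j (j + 1) _ (by omega) (by omega) (by omega)

lemma pvAmul_sq (j : Nat) : pvAmul (pvMatOf j) (pvMatOf j) = pvMatOf (2 * j + 1) := by
  unfold pvAmul pvMatOf
  simp only [pvModP, Prod.mk.injEq]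
  refine ⟨⟨?_, ?_⟩, ?_, ?_⟩
  · exact pvFibEntry (j + 1) (j + 2) (j + 1) (j + 2) _ (by omega) (by omega) (by omega)
  · exact pvFibEntry (j + 1) (j + 2) j (j + 1) _ (by omega) (by omega) (by omega)
  · exact pvFibEntry j (j + 1) (j + 1) (j + 2) _ (by omega) (by omega) (by omega)
  · exact pvFibEntry j (j + 1) j (j + 1) _ (by omega) (by omega) (by omega)

lemma pvAloop_spec (k : Nat) : ∀ (i j : Nat),
    pvAloop (pvAnsOf i) (pvMatOf j) (k : Int) = pvAnsOf (i + (j + 1) * k) := by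
  induction k using Nat.strong_induction_on with
  | _ k ih =>
    intro i j
    rcases Nat.eq_zero_or_pos k with hk | hk
    · subst hk
      rw [pvAloop, dif_neg (by norm_num)]
      simp
    · rw [pvAloop, dif_pos (by exact_mod_cast hk)]
      have hmod : PySem.Int.mod (k : Int) 2 = ((k % 2 : Nat) : Int) := by
        simpa using PySem.Int.mod_natCast k 2
      have hdiv : PySem.Int.floordiv (k : Int) 2 = ((k / 2 : Nat) : Int) := by
        simpa using PySem.Int.floordiv_natCast k 2
      rw [hmod, hdiv]
      rcases Nat.even_or_odd k with he | ho
      · have h2 : ¬ ((k % 2 : Nat) : Int) = 1 := by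
          rcases he with ⟨t, ht⟩; omega
        rw [if_neg h2, pvAmul_sq, ih (k / 2) (by omega) i (2 * j + 1)]
        congr 1
        rcases he with ⟨t, ht⟩; subst ht
        have h3 : (t + t) / 2 = t := by omega
        rw [h3]; ring
      · have h2 : ((k % 2 : Nat) : Int) = 1 := by
          rcases ho with ⟨t, ht⟩; omega
        rw [if_pos h2, pvAmul_ans, pvAmul_sq, ih (k / 2) (by omega) (i + j + 1) (2 * j + 1)]
        congr 1
        rcases ho with ⟨t, ht⟩; subst ht
        have h3 : (2 * t + 1) / 2 = t := by omega
        rw [h3]; ring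

lemma pvFib_two_mul_int (n : Nat) :
    (Nat.fib (2 * n) : Int) = Nat.fib n * (2 * Nat.fib (n + 1) - Nat.fib n) := by
  have hle : Nat.fib n ≤ 2 * Nat.fib (n + 1) := by
    have := Nat.fib_le_fib_succ (n := n); omega
  rw [Nat.fib_two_mul, Nat.cast_mul, Int.natCast_sub hle]
  push_cast
  ring

lemma pvFibPair_spec (k : Nat) : pvFibPair k = (pvFibm k, pvFibm (k + 1)) := by
  induction k using Nat.strong_induction_on with
  | _ k ih =>
    rcases Nat.eq_zero_or_pos k with hk | hk
    · subst hk
      rw [pvFibPair]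
      simp [pvFibm]
    · rw [pvFibPair, dif_neg (by omega)]
      rw [ih (k / 2) (by omega)]
      simp only [pvModP]
      set k' := k / 2 with hk'
      have hc : (pvFibm k' * (2 * pvFibm (k' + 1) - pvFibm k')) % 1000000007 = pvFibm (2 * k') := by
        unfold pvFibm
        have h : (Nat.fib k' : Int) % 1000000007 *
            (2 * ((Nat.fib (k' + 1) : Int) % 1000000007) - (Nat.fib k' : Int) % 1000000007)
            ≡ (Nat.fib k' : Int) * (2 * (Nat.fib (k' + 1) : Int) - (Nat.fib k' : Int))
            [ZMOD 1000000007] :=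
          (pvSelf _).mul ((Int.ModEq.mul_left 2 (pvSelf _)).sub (pvSelf _))
        rw [pvFib_two_mul_int]
        exact h
      have hd : (pvFibm k' * pvFibm k' + pvFibm (k' + 1) * pvFibm (k' + 1)) % 1000000007
          = pvFibm (2 * k' + 1) := by
        unfold pvFibm
        rw [pvMix]
        congr 1
        have hn : Nat.fib k' * Nat.fib k' + Nat.fib (k' + 1) * Nat.fib (k' + 1)
            = Nat.fib (2 * k' + 1) := by
          have := Nat.fib_add k' k'
          have h2 : k' + k' + 1 = 2 * k' + 1 := by omega
          rw [h2] at this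
          omega
        exact_mod_cast congrArg (fun t : Nat => (t : Int)) hn
      have hsum : (pvFibm (2 * k') + pvFibm (2 * k' + 1)) % 1000000007 = pvFibm (2 * k' + 2) := by
        unfold pvFibm
        have h : (Nat.fib (2 * k') : Int) % 1000000007 + (Nat.fib (2 * k' + 1) : Int) % 1000000007
            ≡ (Nat.fib (2 * k') : Int) + (Nat.fib (2 * k' + 1) : Int) [ZMOD 1000000007] :=
          (pvSelf _).add (pvSelf _)
        have h2 : (Nat.fib (2 * k') : Int) + (Nat.fib (2 * k' + 1) : Int)
            = (Nat.fib (2 * k' + 2) : Int) := by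
          exact_mod_cast congrArg (fun t : Nat => (t : Int)) (Nat.fib_add_two (n := 2 * k')).symm
        rw [← h2]
        exact h
      rcases Nat.even_or_odd k with he | ho
      · have h2 : ¬ k % 2 = 1 := by rcases he with ⟨t, ht⟩; omega
        rw [if_neg h2]
        have hk2 : 2 * k' = k := by rcases he with ⟨t, ht⟩; omega
        simp only [hc, hd, hk2]
      · have h2 : k % 2 = 1 := by rcases ho with ⟨t, ht⟩; omega
        rw [if_pos h2]
        have hk2 : 2 * k' + 1 = k := by rcases ho with ⟨t, ht⟩; omega
        rw [hc, hd, hsum]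
        rw [hk2, show 2 * k' + 2 = (2 * k' + 1) + 1 from rfl, hk2]

lemma pvGcd_eq (a b : Int) : pvGcdA a b = pvGcdB a b := by
  induction a, b using pvGcdA.induct with
  | case1 a b h ih => rw [pvGcdA, pvGcdB, dif_pos h, dif_pos h]; exact ih
  | case2 a b h => rw [pvGcdA, pvGcdB, dif_neg h, dif_neg h]

-- ===== VERDICT (by name: the statement is the Claim_ definition above) =====
theorem get_gcd_of_fibonacci_spec : Claim_equal_get_gcd_of_fibonacci := by
  intro n m _
  unfold Spec_get_gcd_of_fibonacci get_gcd_of_fibonacci get_gcd_of_fibonacci_alt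
  rw [← pvGcd_eq]
  set g := pvGcdA n m with hg
  by_cases hle : g ≤ 0
  · rw [if_pos hle, pvAloop, dif_neg (by omega)]
    simp [pvModP]
  · rw [if_neg hle]
    have hcast : ((g.toNat : Nat) : Int) = g := by omega
    have h0 : ((1, 0), (1, 0)) = pvAnsOf 0 := by
      unfold pvAnsOf pvFibm; norm_num
    have h1 : (((1 : Int), (1 : Int)), ((1 : Int), (0 : Int))) = pvMatOf 0 := by
      unfold pvMatOf pvFibm; norm_num
    rw [h0, h1, ← hcast, pvAloop_spec g.toNat 0 0, pvFibPair_spec]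
    simp only [pvAnsOf]
    rw [pvModP]
    simp only [one_mul, Nat.zero_add]
    exact Int.emod_emod_of_dvd _ dvd_rfl
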